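-- pv_equiv track=rewrite | github.com/Turing-dev-community/lazarus-repo-eval-kit | taxonomy_check.py | _median_confidence
-- ===== SOURCE A (Python) =====
-- from typing import Any, Callable, Sequence
--
-- _CONF_ORDER: dict[str, int] = {"high": 3, "medium": 2, "low": 1}
--
-- _CONF_REVERSE: dict[int, str] = {3: "high", 2: "medium", 1: "low"}
--
-- def _median_confidence(confs: Sequence[str]) -> str:
--     levels: list[int] = []
--     for c in confs:
--         key = (c or "").lower().strip()
--         levels.append(_CONF_ORDER.get(key, 2))
--     if not levels:
--         return ""
--     if max(levels) - min(levels) >= 2: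
--         return "mixed"
--     levels.sort()
--     mid = levels[len(levels) // 2]
--     return _CONF_REVERSE.get(mid, "medium")
-- ===== SOURCE B (Python) =====
-- def _median_confidence(confs):
--     # One-pass counting tally of the three levels; no list, no sort.
--     n1 = n2 = n3 = 0
--     for c in confs:
--         key = (c or "").lower().strip()
--         if key == "high":
--             n3 += 1
--         elif key == "low":
--             n1 += 1
--         else:
--             n2 += 1
--     n = n1 + n2 + n3
--     if n == 0:
--         return ""
--     if n1 and n3:
--         return "mixed"
--     m = n // 2
--     if m < n1:
--         return "low"
--     if m < n1 + n2:
--         return "medium"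
--     return "high"
-- ===== Notes on version B (the rewrite author's own statement) =====
-- stated objective: alternative
-- what changed: B replaces A's build-list + max/min scan + sort + index with a single counting pass over the three levels, picking the median by comparing len//2 with cumulative counts; measured only ~1.3x at the largest size (per-string normalisation dominates), so no speed claim.
import Mathlib
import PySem

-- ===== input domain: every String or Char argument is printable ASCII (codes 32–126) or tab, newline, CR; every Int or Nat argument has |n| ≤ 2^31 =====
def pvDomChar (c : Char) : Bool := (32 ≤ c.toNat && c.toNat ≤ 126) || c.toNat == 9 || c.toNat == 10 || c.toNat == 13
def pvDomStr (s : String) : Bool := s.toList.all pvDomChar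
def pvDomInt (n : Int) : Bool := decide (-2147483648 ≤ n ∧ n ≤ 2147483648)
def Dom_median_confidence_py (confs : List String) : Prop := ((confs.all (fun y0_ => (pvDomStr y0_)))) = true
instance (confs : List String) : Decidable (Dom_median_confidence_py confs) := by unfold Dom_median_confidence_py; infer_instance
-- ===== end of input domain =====

-- B replaces A's build-list + max/min + sort + index by a one-pass counting tally of the three levels.

-- ===== PORT A =====
def pvConfOrder : PySem.Dict String Int :=
  ((PySem.Dict.empty.insert "high" 3).insert "medium" 2).insert "low" 1

def pvConfReverse : PySem.Dict Int String :=
  ((PySem.Dict.empty.insert 3 "high").insert 2 "medium").insert 1 "low"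

def median_confidence_py (confs : List String) : String :=
  -- levels = []; for c in confs: levels.append(_CONF_ORDER.get((c or "").lower().strip(), 2))
  let levels : List Int := confs.foldl
    (fun acc c =>
      let key := PySem.Str.strip (PySem.Str.lower (if c = "" then "" else c))  -- (c or "")
      acc ++ [pvConfOrder.getD key 2]) []
  if levels = [] then ""
  else
    -- max(levels), min(levels): levels is nonempty here, so the .getD default is never used
    let mx := (PySem.List.max? levels (fun x => x)).getD 0
    let mn := (PySem.List.min? levels (fun x => x)).getD 0
    if mx - mn ≥ 2 then "mixed"
    else
      let s := PySem.List.sorted levels (fun x => x) false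
      -- levels[len(levels)//2]: len is a Nat and Python's // on non-negative ints is Nat division;
      -- the index is in range (levels nonempty), so the pyGetD default is never used
      let mid := PySem.List.pyGetD s ((levels.length / 2 : Nat) : Int) 0
      pvConfReverse.getD mid "medium"

-- ===== PORT B =====
def median_confidence_py_alt (confs : List String) : String :=
  let t : Int × Int × Int := confs.foldl
    (fun acc c =>
      let key := PySem.Str.strip (PySem.Str.lower (if c = "" then "" else c))
      if key = "high" then (acc.1, acc.2.1, acc.2.2 + 1)
      else if key = "low" then (acc.1 + 1, acc.2.1, acc.2.2)
      else (acc.1, acc.2.1 + 1, acc.2.2))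
    (0, 0, 0)
  let n1 := t.1
  let n2 := t.2.1
  let n3 := t.2.2
  let n := n1 + n2 + n3
  if n = 0 then ""
  else if n1 ≠ 0 ∧ n3 ≠ 0 then "mixed"
  else
    let m := PySem.Int.floordiv n 2
    if m < n1 then "low"
    else if m < n1 + n2 then "medium"
    else "high"

-- ===== PRECONDITION & SPEC =====
def Spec_median_confidence_py (confs : List String) (out : String) : Prop := out = median_confidence_py_alt confs
instance (confs : List String) (out : String) : Decidable (Spec_median_confidence_py confs out) := by unfold Spec_median_confidence_py; infer_instance

-- ===== CLAIM (what is proved, stated in full; the proofs are below) =====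
def Claim_equal_median_confidence_py : Prop := ∀ (confs : List String), Dom_median_confidence_py confs → Spec_median_confidence_py confs (median_confidence_py confs)

-- ===== LEMMAS AND PROOFS =====

-- the numeric level both programs assign to one confidence string
def pvLev (c : String) : Int :=
  pvConfOrder.getD (PySem.Str.strip (PySem.Str.lower (if c = "" then "" else c))) 2

-- B's per-element update, phrased on the level value
def pvStep (acc : Int × Int × Int) (v : Int) : Int × Int × Int :=
  if v = 3 then (acc.1, acc.2.1, acc.2.2 + 1)
  else if v = 1 then (acc.1 + 1, acc.2.1, acc.2.2)
  else (acc.1, acc.2.1 + 1, acc.2.2)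

theorem pvGetD_cases (key : String) :
    pvConfOrder.getD key 2 = 1 ∨ pvConfOrder.getD key 2 = 2 ∨ pvConfOrder.getD key 2 = 3 := by
  unfold pvConfOrder
  rw [PySem.Dict.getD_insert, PySem.Dict.getD_insert, PySem.Dict.getD_insert]
  split_ifs <;> tauto

theorem pvLev_cases (c : String) : pvLev c = 1 ∨ pvLev c = 2 ∨ pvLev c = 3 := pvGetD_cases _

theorem pvStep_key (acc : Int × Int × Int) (key : String) :
    (if key = "high" then (acc.1, acc.2.1, acc.2.2 + 1)
     else if key = "low" then (acc.1 + 1, acc.2.1, acc.2.2)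
     else (acc.1, acc.2.1 + 1, acc.2.2))
    = pvStep acc (pvConfOrder.getD key 2) := by
  unfold pvStep pvConfOrder
  rw [PySem.Dict.getD_insert, PySem.Dict.getD_insert, PySem.Dict.getD_insert]
  split_ifs <;> simp_all

theorem pvBody_eq :
    (fun (acc : Int × Int × Int) (c : String) =>
      let key := PySem.Str.strip (PySem.Str.lower (if c = "" then "" else c))
      if key = "high" then (acc.1, acc.2.1, acc.2.2 + 1)
      else if key = "low" then (acc.1 + 1, acc.2.1, acc.2.2)
      else (acc.1, acc.2.1 + 1, acc.2.2))
    = fun acc c => pvStep acc (pvLev c) := by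
  funext acc c
  exact pvStep_key acc _

theorem pvStep_counts (L : List Int) :
    (∀ x ∈ L, x = 1 ∨ x = 2 ∨ x = 3) → ∀ a b c : Int,
    L.foldl pvStep (a, b, c)
      = (a + (L.count 1 : Int), b + (L.count 2 : Int), c + (L.count 3 : Int)) := by
  induction L with
  | nil => intro _ a b c; simp
  | cons x xs ih =>
    intro hmem a b c
    have hx := hmem x (by simp)
    have ih' := ih (fun y hy => hmem y (by simp [hy]))
    simp only [List.foldl_cons]
    rcases hx with h | h | h <;> subst h <;>
      simp [pvStep, ih'] <;> ring

theorem pvSum_counts (L : List Int) (hmem : ∀ x ∈ L, x = 1 ∨ x = 2 ∨ x = 3) :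
    L.count 1 + L.count 2 + L.count 3 = L.length := by
  induction L with
  | nil => simp
  | cons x xs ih =>
    have hx := hmem x (by simp)
    have := ih (fun y hy => hmem y (by simp [hy]))
    rcases hx with h | h | h <;> subst h <;> simp_all <;> omega

-- the sorted list of levels is a concatenation of three constant blocks
theorem pvSorted_rep (L : List Int) (hmem : ∀ x ∈ L, x = 1 ∨ x = 2 ∨ x = 3) :
    PySem.List.sorted L (fun x => x) false
      = List.replicate (L.count 1) 1 ++ List.replicate (L.count 2) 2 ++ List.replicate (L.count 3) 3 := by
  apply PySem.List.sorted_id_eq_of_perm_of_pairwise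
  · rw [List.perm_iff_count]
    intro a
    by_cases h1 : a = 1 <;> by_cases h2 : a = 2 <;> by_cases h3 : a = 3 <;>
      simp_all [List.count_append, List.count_replicate]
    rw [if_neg (by omega), if_neg (by omega), if_neg (by omega)]
    have : a ∉ L := fun hmemL => by rcases hmem a hmemL with h | h | h <;> simp_all
    simp [List.count_eq_zero.mpr this]
  · have hrep : ∀ (n : Nat) (v : Int), (List.replicate n v).Pairwise (fun x y : Int => x ≤ y) :=
      fun n v => List.pairwise_replicate.mpr (Or.inr (le_refl v))
    have hcross : ∀ (n m : Nat) (v w : Int), v ≤ w →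
        ∀ x ∈ List.replicate n v, ∀ y ∈ List.replicate m w, x ≤ y := by
      intro n m v w hvw x hx y hy
      rw [List.eq_of_mem_replicate hx, List.eq_of_mem_replicate hy]; exact hvw
    rw [List.pairwise_append]
    refine ⟨?_, hrep _ _, ?_⟩
    · rw [List.pairwise_append]
      exact ⟨hrep _ _, hrep _ _, hcross _ _ _ _ (by norm_num)⟩
    · intro x hx y hy
      rcases List.mem_append.mp hx with h | h
      · exact hcross _ _ _ _ (by norm_num) x h y hy
      · exact hcross _ _ _ _ (by norm_num) x h y hy

-- indexing into the three constant blocks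
theorem pvGetRep (c1 c2 c3 m : Nat) (h : m < c1 + c2 + c3) :
    (List.replicate c1 (1:Int) ++ List.replicate c2 2 ++ List.replicate c3 3).getD m 0
      = if m < c1 then 1 else if m < c1 + c2 then 2 else 3 := by
  rw [List.getD_eq_getElem _ _ (by simp; omega)]
  simp only [List.getElem_append, List.length_append, List.length_replicate]
  split_ifs <;> (simp_all [List.getElem_replicate]; try omega)

theorem median_confidence_py_spec' (confs : List String) :
    median_confidence_py confs = median_confidence_py_alt confs := by
  unfold median_confidence_py median_confidence_py_alt
  have hA : confs.foldl
      (fun (acc : List Int) c =>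
        let key := PySem.Str.strip (PySem.Str.lower (if c = "" then "" else c))
        acc ++ [pvConfOrder.getD key 2]) []
      = confs.map pvLev := by
    have hb : (fun (acc : List Int) c =>
        let key := PySem.Str.strip (PySem.Str.lower (if c = "" then "" else c))
        acc ++ [pvConfOrder.getD key 2])
      = (fun acc c => acc ++ [pvLev c]) := rfl
    rw [hb, PySem.List.foldl_append_singleton_eq_map pvLev confs []]
    simp
  have hmem : ∀ x ∈ confs.map pvLev, x = 1 ∨ x = 2 ∨ x = 3 := by
    intro x hx
    rcases List.mem_map.mp hx with ⟨c, _, rfl⟩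
    exact pvLev_cases c
  have hB : confs.foldl (fun acc c => pvStep acc (pvLev c)) ((0:Int), (0:Int), (0:Int))
      = (confs.map pvLev).foldl pvStep (0, 0, 0) := by
    rw [List.foldl_map]
  rw [hA, pvBody_eq, hB, pvStep_counts (confs.map pvLev) hmem 0 0 0]
  have hsum := pvSum_counts (confs.map pvLev) hmem
  set L := confs.map pvLev with hL
  simp only [zero_add]
  by_cases hnil : L = []
  · rw [hnil] at hsum ⊢
    simp
  · have hlen : 0 < L.length := List.length_pos_iff.mpr hnil
    have h0 : ¬ ((L.count 1 : Int) + (L.count 2 : Int) + (L.count 3 : Int) = 0) := by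
      omega
    rw [if_neg hnil, if_neg h0]
    obtain ⟨mx, hmx⟩ : ∃ m, PySem.List.max? L (fun x => x) = some m := by
      cases h : PySem.List.max? L (fun x => x) with
      | none => exact absurd ((PySem.List.max?_eq_none_iff L _).mp h) hnil
      | some m => exact ⟨m, rfl⟩
    obtain ⟨mn, hmn⟩ : ∃ m, PySem.List.min? L (fun x => x) = some m := by
      cases h : PySem.List.min? L (fun x => x) with
      | none => exact absurd ((PySem.List.min?_eq_none_iff L _).mp h) hnil
      | some m => exact ⟨m, rfl⟩
    rw [hmx, hmn]
    simp only [Option.getD_some]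
    have hmix : (mx - mn ≥ 2) ↔ ((L.count 1 : Int) ≠ 0 ∧ (L.count 3 : Int) ≠ 0) := by
      have hmxmem := hmem mx (PySem.List.max?_mem hmx)
      have hmnmem := hmem mn (PySem.List.min?_mem hmn)
      constructor
      · intro hge
        have hmx3 : mx = 3 := by rcases hmxmem with h | h | h <;> rcases hmnmem with g | g | g <;> omega
        have hmn1 : mn = 1 := by rcases hmxmem with h | h | h <;> rcases hmnmem with g | g | g <;> omega
        have h3 : (3:Int) ∈ L := hmx3 ▸ PySem.List.max?_mem hmx
        have h1 : (1:Int) ∈ L := hmn1 ▸ PySem.List.min?_mem hmn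
        have hc1 := List.count_pos_iff.mpr h1
        have hc3 := List.count_pos_iff.mpr h3
        constructor <;> omega
      · rintro ⟨h1, h3⟩
        have h1' : (1:Int) ∈ L := List.count_pos_iff.mp (by omega)
        have h3' : (3:Int) ∈ L := List.count_pos_iff.mp (by omega)
        have := PySem.List.max?_isMax hmx 3 h3'
        have := PySem.List.min?_isMin hmn 1 h1'
        simp only at this ⊢
        omega
    by_cases hmx2 : mx - mn ≥ 2
    · rw [if_pos hmx2, if_pos (hmix.mp hmx2)]
    · rw [if_neg hmx2, if_neg (fun hc => hmx2 (hmix.mpr hc))]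
      rw [pvSorted_rep L hmem]
      have hfd : PySem.Int.floordiv ((L.count 1 : Int) + (L.count 2 : Int) + (L.count 3 : Int)) 2
          = ((L.length / 2 : Nat) : Int) := by
        have he : ((L.count 1 : Int) + (L.count 2 : Int) + (L.count 3 : Int)) = (L.length : Int) := by
          omega
        rw [he]
        simp [PySem.Int.floordiv, Int.fdiv_eq_ediv]
      rw [hfd, PySem.List.pyGetD_natCast, pvGetRep _ _ _ _ (by omega)]
      by_cases h1 : L.length / 2 < L.count 1
      · rw [if_pos h1, if_pos (show ((L.length / 2 : Nat) : Int) < (L.count 1 : Int) by exact_mod_cast h1)]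
        rfl
      · rw [if_neg h1, if_neg (show ¬ ((L.length / 2 : Nat) : Int) < (L.count 1 : Int) by push_cast at *; omega)]
        by_cases h2 : L.length / 2 < L.count 1 + L.count 2
        · rw [if_pos h2, if_pos (show ((L.length / 2 : Nat) : Int) < (L.count 1 : Int) + (L.count 2 : Int) by push_cast at *; omega)]
          rfl
        · rw [if_neg h2, if_neg (show ¬ ((L.length / 2 : Nat) : Int) < (L.count 1 : Int) + (L.count 2 : Int) by push_cast at *; omega)]
          rfl

-- ===== VERDICT (by name: the statement is the Claim_ definition above) =====
theorem median_confidence_py_spec : Claim_equal_median_confidence_py := by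
  intro confs _
  unfold Spec_median_confidence_py
  exact median_confidence_py_spec' confs
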